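-- pv_equiv track=rewrite | github.com/sterling-c/CS100 | Assignments/Sample Final/Fall_2017.py | vowelEndings
-- ===== SOURCE A (Python) =====
-- def vowelEndings(text):
--     endDict = {}
--     vowels = 'aeiou'
--     wordList = text.split()
--     for word in wordList:
--         if(word[-1] in vowels):
--             if (word[-1] not in endDict):
--                 endDict[word[-1]] = []
--             endDict[word[-1]].append(word)
--     return endDict
-- ===== SOURCE B (Python) =====
-- def vowelEndings(text):
--     words = [w for w in text.split() if w[-1] in 'aeiou']
--     keys = list(dict.fromkeys(w[-1] for w in words))
--     return {k: [w for w in words if w[-1] == k] for k in keys}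
-- ===== Notes on version B (the rewrite author's own statement) =====
-- stated objective: simpler
-- what changed: A scatters words into dict buckets during one linear scan, testing each time whether the bucket already exists; B first filters the vowel-ending words, dedups their last letters to fix the key order, then builds the result as a dict comprehension with one filter pass per key.
import Mathlib
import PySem

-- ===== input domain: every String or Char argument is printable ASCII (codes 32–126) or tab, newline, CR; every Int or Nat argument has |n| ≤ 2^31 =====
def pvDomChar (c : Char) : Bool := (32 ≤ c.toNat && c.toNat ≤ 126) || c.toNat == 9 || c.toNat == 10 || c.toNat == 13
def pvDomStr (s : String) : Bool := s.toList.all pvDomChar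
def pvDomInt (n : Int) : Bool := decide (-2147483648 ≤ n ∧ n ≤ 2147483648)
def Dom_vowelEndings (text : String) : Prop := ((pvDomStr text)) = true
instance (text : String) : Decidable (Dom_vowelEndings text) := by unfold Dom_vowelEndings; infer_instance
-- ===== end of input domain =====

-- B replaces A's single scatter-into-dict pass by a dedup of the ending letters followed by a
-- per-letter filter (a dict comprehension): shorter and plainer, not faster (objective: simpler).


-- ===== PORT A =====
-- word[-1] as a Python (length-1) string; words produced by split() are nonempty, so the
-- "" default is never reached (Python never raises here).
def pvLast (w : String) : String :=
  match PySem.Str.pyGet? w (-1) with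
  | some c => String.ofList [c]
  | none => ""

def vowelEndings (text : String) : List (String × List String) :=
  let vowels := "aeiou"
  let wordList := PySem.Str.split₀ text
  (wordList.foldl (fun endDict word =>
    if PySem.Str.isIn (pvLast word) vowels then
      let endDict := if endDict.contains (pvLast word) then endDict
                     else endDict.insert (pvLast word) []
      endDict.modify (pvLast word) [] (fun l => l ++ [word])
    else endDict) PySem.Dict.empty).items

-- ===== PORT B =====
def vowelEndings_alt (text : String) : List (String × List String) :=
  let words := (PySem.Str.split₀ text).filter (fun w => PySem.Str.isIn (pvLast w) "aeiou")
  let keys := PySem.List.dedup (words.map pvLast)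
  keys.map (fun k => (k, words.filter (fun w => pvLast w == k)))

-- ===== PRECONDITION & SPEC =====
def Spec_vowelEndings (text : String) (out : List (String × List String)) : Prop := out = vowelEndings_alt text
instance (text : String) (out : List (String × List String)) : Decidable (Spec_vowelEndings text out) := by unfold Spec_vowelEndings; infer_instance

-- ===== CLAIM (what is proved, stated in full; the proofs are below) =====
def Claim_equal_vowelEndings : Prop := ∀ (text : String), Dom_vowelEndings text → Spec_vowelEndings text (vowelEndings text)

-- ===== LEMMAS AND PROOFS =====

-- A's "if absent, insert []; then append" is exactly Dict.modify with default [].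
lemma stepA_eq_modify (d : PySem.Dict String (List String)) (c : String) (w : String) :
    (if d.contains c then d else d.insert c []).modify c [] (fun l => l ++ [w])
      = d.modify c [] (fun l => l ++ [w]) := by
  by_cases h : d.contains c
  · simp [h]
  · simp only [Bool.not_eq_true] at h
    simp [h, PySem.Dict.modify, PySem.Dict.getD_insert_self,
      PySem.Dict.insert_insert_self, PySem.Dict.getD_of_not_contains (k := c) d ([] : List String) h]

theorem vowelEndings_spec : Claim_equal_vowelEndings := by
  intro text _
  show vowelEndings text = vowelEndings_alt text
  unfold vowelEndings vowelEndings_alt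
  simp only []
  -- rewrite A's loop body into a single Dict.modify step
  rw [PySem.List.foldl_congr_mem _ _
        (fun d w => if PySem.Str.isIn (pvLast w) "aeiou"
                    then d.modify (pvLast w) [] (fun l => l ++ [w]) else d) _
        (by intro acc x _; simp [stepA_eq_modify])]
  -- drop the guard: fold over the filtered word list
  have h2 : (PySem.Str.split₀ text).foldl
      (fun (d : PySem.Dict String (List String)) w =>
        if PySem.Str.isIn (pvLast w) "aeiou"
        then d.modify (pvLast w) [] (fun l => l ++ [w]) else d) PySem.Dict.empty
      = ((PySem.Str.split₀ text).filter (fun w => PySem.Str.isIn (pvLast w) "aeiou")).foldl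
          (fun d w => d.modify (pvLast w) [] (fun l => l ++ [w])) PySem.Dict.empty :=
    PySem.List.foldl_if_eq_foldl_filter _ _ _ _
  rw [h2]
  set words := (PySem.Str.split₀ text).filter (fun w => PySem.Str.isIn (pvLast w) "aeiou") with hw
  -- the grouping fold, described by its keys and lookups
  have hnd : (words.foldl (fun d w => d.modify (pvLast w) [] (fun l => l ++ [w]))
      PySem.Dict.empty).keys.Nodup :=
    PySem.Dict.nodup_keys_foldl_modify_key words pvLast []
      (fun _ w l => l ++ [w]) PySem.Dict.empty (by simp)
  rw [PySem.Dict.items_eq_map_keys _ hnd []]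
  have hkeys : (words.foldl (fun d w => d.modify (pvLast w) [] (fun l => l ++ [w]))
      PySem.Dict.empty).keys = PySem.Set.ofList (words.map pvLast) := by
    rw [PySem.Dict.keys_foldl_modify_key words pvLast [] (fun _ w l => l ++ [w])]
    simp [PySem.Set.update, PySem.Set.ofList_eq_foldl]
  rw [hkeys]
  simp only [PySem.List.dedup_eq_ofList]
  apply List.map_congr_left
  intro k _
  -- the value at key k is the sublist of words ending in k
  have hval : (words.foldl (fun d w => d.modify (pvLast w) [] (fun l => l ++ [w]))
      PySem.Dict.empty).getD k []
      = (words.filter (fun w => pvLast w == k)) := by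
    have h3 := PySem.Dict.getD_foldl_modify_append
      (words.map (fun w => (pvLast w, w))) PySem.Dict.empty k
    rw [List.foldl_map] at h3
    simpa [List.filter_map, Function.comp_def] using h3
  rw [hval]
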